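-- pv_equiv track=rewrite | github.com/zadevaibhav2001/WhatsApp-Messages-Generator | live_script.py | detect_links_and_message
-- ===== SOURCE A (Python) =====
-- def detect_links_and_message(content):
--     lines = [line.strip() for line in content.splitlines() if line.strip()]
--     fb_link = yt_link = None
--     message_lines = []
--     for line in lines:
--         if "facebook.com" in line:
--             fb_link = line
--         elif "youtu" in line:
--             yt_link = line
--         else:
--             message_lines.append(line)
--     return "\n".join(message_lines), fb_link, yt_link
-- ===== SOURCE B (Python) =====
-- def detect_links_and_message(content):
--     lines = [s for s in (line.strip() for line in content.splitlines()) if s]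
--     fbs = [l for l in lines if "facebook.com" in l]
--     yts = [l for l in lines if "youtu" in l and "facebook.com" not in l]
--     msgs = [l for l in lines if "facebook.com" not in l and "youtu" not in l]
--     return ("\n".join(msgs), fbs[-1] if fbs else None, yts[-1] if yts else None)
-- ===== Notes on version B (the rewrite author's own statement) =====
-- stated objective: alternative
-- what changed: Replaces the single stateful branching loop (mutable fb/yt slots and an appended message list) with three independent filter passes over the stripped-line list, taking the final element of each link filter; the elif precedence and last-wins update become explicit filter predicates instead of loop state.
import Mathlib
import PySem

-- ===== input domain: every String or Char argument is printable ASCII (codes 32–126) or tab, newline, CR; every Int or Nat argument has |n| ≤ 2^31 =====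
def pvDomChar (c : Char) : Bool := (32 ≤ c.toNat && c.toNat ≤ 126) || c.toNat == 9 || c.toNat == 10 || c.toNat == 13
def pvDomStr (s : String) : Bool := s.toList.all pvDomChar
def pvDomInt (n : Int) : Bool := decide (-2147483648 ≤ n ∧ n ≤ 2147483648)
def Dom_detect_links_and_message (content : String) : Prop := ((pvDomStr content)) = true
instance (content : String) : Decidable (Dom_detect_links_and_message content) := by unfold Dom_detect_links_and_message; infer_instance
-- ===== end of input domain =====

-- B replaces A's single stateful branching loop by three independent filter passes
-- (last facebook line, last youtu-but-not-facebook line, lines with neither); same cost, alternative decomposition.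

-- ===== PORT A =====
def detect_links_and_message (content : String) : String × Option String × Option String :=
  let lines := ((PySem.Str.splitlines content).map PySem.Str.strip).filter (fun l => l ≠ "")
  let st := lines.foldl (fun (st : Option String × Option String × List String) l =>
      if PySem.Str.isIn "facebook.com" l then (some l, st.2.1, st.2.2)
      else if PySem.Str.isIn "youtu" l then (st.1, some l, st.2.2)
      else (st.1, st.2.1, st.2.2 ++ [l])) (none, none, [])
  (PySem.Str.join "\n" st.2.2, st.1, st.2.1)

-- ===== PORT B =====
def detect_links_and_message_alt (content : String) : String × Option String × Option String :=
  let lines := ((PySem.Str.splitlines content).map PySem.Str.strip).filter (fun l => l ≠ "")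
  let fbs := lines.filter (fun l => PySem.Str.isIn "facebook.com" l)
  let yts := lines.filter (fun l => PySem.Str.isIn "youtu" l && !PySem.Str.isIn "facebook.com" l)
  let msgs := lines.filter (fun l => !PySem.Str.isIn "facebook.com" l && !PySem.Str.isIn "youtu" l)
  (PySem.Str.join "\n" msgs, fbs.getLast?, yts.getLast?)

-- ===== PRECONDITION & SPEC =====
def Spec_detect_links_and_message (content : String) (out : String × Option String × Option String) : Prop := out = detect_links_and_message_alt content
instance (content : String) (out : String × Option String × Option String) : Decidable (Spec_detect_links_and_message content out) := by unfold Spec_detect_links_and_message; infer_instance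

-- ===== CLAIM (what is proved, stated in full; the proofs are below) =====
def Claim_equal_detect_links_and_message : Prop := ∀ (content : String), Dom_detect_links_and_message content → Spec_detect_links_and_message content (detect_links_and_message content)

-- ===== LEMMAS AND PROOFS =====

theorem getLast?_cons_or {α : Type} (a : α) (l : List α) (o : Option α) :
    ((a :: l).getLast?).or o = (l.getLast?).or (some a) := by
  cases l with
  | nil => simp
  | cons b t => simp [List.getLast?_cons]

theorem fold_eq_filters (lines : List String) (fb yt : Option String) (ms : List String) :
    lines.foldl (fun (st : Option String × Option String × List String) l =>
      if PySem.Str.isIn "facebook.com" l then (some l, st.2.1, st.2.2)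
      else if PySem.Str.isIn "youtu" l then (st.1, some l, st.2.2)
      else (st.1, st.2.1, st.2.2 ++ [l])) (fb, yt, ms)
    = (((lines.filter (fun l => PySem.Str.isIn "facebook.com" l)).getLast?).or fb,
       ((lines.filter (fun l => PySem.Str.isIn "youtu" l && !PySem.Str.isIn "facebook.com" l)).getLast?).or yt,
       ms ++ lines.filter (fun l => !PySem.Str.isIn "facebook.com" l && !PySem.Str.isIn "youtu" l)) := by
  induction lines generalizing fb yt ms with
  | nil => simp
  | cons l t ih =>
    by_cases hf : PySem.Str.isIn "facebook.com" l = true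
    · simp only [List.foldl_cons, List.filter_cons, hf, if_true, Bool.not_true, Bool.false_and,
        Bool.and_false, if_false, ih, getLast?_cons_or, Bool.false_eq_true]
    · by_cases hy : PySem.Str.isIn "youtu" l = true
      · simp only [List.foldl_cons, List.filter_cons, hf, hy, Bool.not_true, Bool.not_false,
          Bool.true_and, Bool.and_true, Bool.false_and, if_true, if_false, ih, getLast?_cons_or,
          Bool.false_eq_true, ite_false, ite_true]
      · simp only [List.foldl_cons, List.filter_cons, hf, hy, Bool.not_false,
          Bool.and_true, Bool.and_self, if_true, if_false, ih, Bool.false_eq_true,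
          List.append_assoc, List.singleton_append]

-- ===== VERDICT (by name: the statement is the Claim_ definition above) =====
theorem detect_links_and_message_spec : Claim_equal_detect_links_and_message := by
  intro content _
  unfold Spec_detect_links_and_message detect_links_and_message detect_links_and_message_alt
  simp only [fold_eq_filters, Option.or_none, List.nil_append]
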